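-- pv_equiv track=rewrite | github.com/wilmurillo-ai/Design-Assistant | .skills/openclaw-skills/skills/wszhhx/fooocus-image-gen/scripts/generate_image.py | natural_language_to_params
-- ===== SOURCE A (Python) =====
-- from typing import Optional, List, Dict, Any
--
-- def natural_language_to_params(prompt: str) -> Dict:
--     """Convert natural language hints to parameters."""
--     params = {}
--     prompt_lower = prompt.lower()
--
--     # Detect style hints
--     if any(word in prompt_lower for word in ["anime", "manga", "cartoon", "chibi"]):
--         params["preset"] = "anime"
--     elif any(word in prompt_lower for word in ["photo", "realistic", "photorealistic", "portrait"]):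
--         params["preset"] = "realistic"
--     elif any(word in prompt_lower for word in ["fast", "quick", "draft"]):
--         params["preset"] = "lcm"
--
--     # Detect aspect ratio hints
--     if any(word in prompt_lower for word in ["landscape", "panoramic", "wide"]):
--         params["aspect_ratio"] = "16:9"
--     elif any(word in prompt_lower for word in ["portrait", "vertical", "tall"]):
--         params["aspect_ratio"] = "9:16"
--
--     return params
-- ===== SOURCE B (Python) =====
-- # Text-driven scan: instead of testing each keyword against the prompt with
-- # `in`, walk the prompt once and look up every bounded-length substring in a
-- # keyword table, keeping the highest-priority (lowest-rank) hit per group.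
--
-- _KEYWORDS = {
--     "anime":          [("preset", 0, "anime")],
--     "manga":          [("preset", 0, "anime")],
--     "cartoon":        [("preset", 0, "anime")],
--     "chibi":          [("preset", 0, "anime")],
--     "photo":          [("preset", 1, "realistic")],
--     "realistic":      [("preset", 1, "realistic")],
--     "photorealistic": [("preset", 1, "realistic")],
--     "portrait":       [("preset", 1, "realistic"), ("aspect_ratio", 1, "9:16")],
--     "fast":           [("preset", 2, "lcm")],
--     "quick":          [("preset", 2, "lcm")],
--     "draft":          [("preset", 2, "lcm")],
--     "landscape":      [("aspect_ratio", 0, "16:9")],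
--     "panoramic":      [("aspect_ratio", 0, "16:9")],
--     "wide":           [("aspect_ratio", 0, "16:9")],
--     "vertical":       [("aspect_ratio", 1, "9:16")],
--     "tall":           [("aspect_ratio", 1, "9:16")],
-- }
-- _LENGTHS = sorted({len(kw) for kw in _KEYWORDS})
--
--
-- def natural_language_to_params(prompt: str) -> dict:
--     """Convert natural language hints to parameters (single substring scan)."""
--     text = prompt.lower()
--     best_preset = None
--     best_aspect = None
--     for start in range(len(text)):
--         for length in _LENGTHS:
--             for key, rank, value in _KEYWORDS.get(text[start:start + length], []):
--                 if key == "preset":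
--                     if best_preset is None or rank < best_preset[0]:
--                         best_preset = (rank, value)
--                 else:
--                     if best_aspect is None or rank < best_aspect[0]:
--                         best_aspect = (rank, value)
--     params = {}
--     if best_preset is not None:
--         params["preset"] = best_preset[1]
--     if best_aspect is not None:
--         params["aspect_ratio"] = best_aspect[1]
--     return params
-- ===== Notes on version B (the rewrite author's own statement) =====
-- stated objective: alternative
-- what changed: Inverted the search direction: instead of testing each keyword against the prompt with substring containment in if/elif chains, B walks the lowered prompt once and looks every bounded-length substring up in a keyword-to-(group,rank,value) table, keeping the lowest-rank hit per group; the params dict is assembled from the two best slots at the end.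
import Mathlib
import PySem

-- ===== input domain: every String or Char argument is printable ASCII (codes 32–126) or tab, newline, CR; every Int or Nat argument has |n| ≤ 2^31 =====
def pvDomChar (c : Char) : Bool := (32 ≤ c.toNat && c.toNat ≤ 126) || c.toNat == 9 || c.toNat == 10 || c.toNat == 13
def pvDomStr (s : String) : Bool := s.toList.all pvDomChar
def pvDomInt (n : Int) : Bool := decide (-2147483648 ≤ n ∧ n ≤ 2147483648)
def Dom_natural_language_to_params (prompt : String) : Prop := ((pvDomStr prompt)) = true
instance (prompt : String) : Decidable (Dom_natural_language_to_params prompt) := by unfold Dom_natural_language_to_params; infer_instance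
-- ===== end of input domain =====

-- B inverts the search direction: instead of testing each keyword against the prompt with `in` in if/elif chains,
-- it scans the lowered prompt once, looking each bounded-length substring up in a keyword table and keeping the
-- lowest-rank hit per parameter group (alternative algorithm; no speed claim).


-- ===== PORT A =====
def natural_language_to_params (prompt : String) : List (String × String) :=
  let params : PySem.Dict String String := PySem.Dict.empty
  let prompt_lower := PySem.Str.lower prompt
  -- Detect style hints
  let params :=
    if (["anime", "manga", "cartoon", "chibi"].any (fun word => PySem.Str.isIn word prompt_lower)) then
      params.insert "preset" "anime"
    else if (["photo", "realistic", "photorealistic", "portrait"].any (fun word => PySem.Str.isIn word prompt_lower)) then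
      params.insert "preset" "realistic"
    else if (["fast", "quick", "draft"].any (fun word => PySem.Str.isIn word prompt_lower)) then
      params.insert "preset" "lcm"
    else params
  -- Detect aspect ratio hints
  let params :=
    if (["landscape", "panoramic", "wide"].any (fun word => PySem.Str.isIn word prompt_lower)) then
      params.insert "aspect_ratio" "16:9"
    else if (["portrait", "vertical", "tall"].any (fun word => PySem.Str.isIn word prompt_lower)) then
      params.insert "aspect_ratio" "9:16"
    else params
  params.items

-- ===== PORT B =====
-- Source B's module-level keyword table: substring -> list of (param key, rank, value)
def nlpKeywords : PySem.Dict String (List (String × Int × String)) :=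
  PySem.Dict.ofList
    [ ("anime",          [("preset", 0, "anime")]),
      ("manga",          [("preset", 0, "anime")]),
      ("cartoon",        [("preset", 0, "anime")]),
      ("chibi",          [("preset", 0, "anime")]),
      ("photo",          [("preset", 1, "realistic")]),
      ("realistic",      [("preset", 1, "realistic")]),
      ("photorealistic", [("preset", 1, "realistic")]),
      ("portrait",       [("preset", 1, "realistic"), ("aspect_ratio", 1, "9:16")]),
      ("fast",           [("preset", 2, "lcm")]),
      ("quick",          [("preset", 2, "lcm")]),
      ("draft",          [("preset", 2, "lcm")]),
      ("landscape",      [("aspect_ratio", 0, "16:9")]),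
      ("panoramic",      [("aspect_ratio", 0, "16:9")]),
      ("wide",           [("aspect_ratio", 0, "16:9")]),
      ("vertical",       [("aspect_ratio", 1, "9:16")]),
      ("tall",           [("aspect_ratio", 1, "9:16")]) ]

-- Source B: _LENGTHS = sorted({len(kw) for kw in _KEYWORDS})
def nlpLengths : List Int :=
  PySem.List.sorted
    (PySem.Set.ofList ((PySem.Dict.keys nlpKeywords).map (fun kw => PySem.Str.len kw)))
    (fun x => x) false

-- Source B's slot update: "if best is None or rank < best[0]: best = (rank, value)"
def nlpUpdSlot (slot : Option (Int × String)) (rv : Int × String) : Option (Int × String) :=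
  match slot with
  | none => some rv
  | some b => if rv.1 < b.1 then some rv else some b

def natural_language_to_params_alt (prompt : String) : List (String × String) :=
  let text := PySem.Str.lower prompt
  let best :=
    (PySem.List.pyRange 0 (PySem.Str.len text) 1).foldl
      (fun best start =>
        nlpLengths.foldl
          (fun best length =>
            (nlpKeywords.getD (PySem.Str.slice text (some start) (some (start + length))) []).foldl
              (fun (best : Option (Int × String) × Option (Int × String)) e =>
                if e.1 == "preset" then (nlpUpdSlot best.1 e.2, best.2)
                else (best.1, nlpUpdSlot best.2 e.2))
              best)
          best)
      (none, none)
  let params : PySem.Dict String String := PySem.Dict.empty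
  let params :=
    match best.1 with
    | some b => params.insert "preset" b.2
    | none => params
  let params :=
    match best.2 with
    | some b => params.insert "aspect_ratio" b.2
    | none => params
  params.items

-- ===== PRECONDITION & SPEC =====
def Spec_natural_language_to_params (prompt : String) (out : List (String × String)) : Prop := out = natural_language_to_params_alt prompt
instance (prompt : String) (out : List (String × String)) : Decidable (Spec_natural_language_to_params prompt out) := by unfold Spec_natural_language_to_params; infer_instance

-- ===== CLAIM (what is proved, stated in full; the proofs are below) =====
def Claim_equal_natural_language_to_params : Prop := ∀ (prompt : String), Dom_natural_language_to_params prompt → Spec_natural_language_to_params prompt (natural_language_to_params prompt)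

-- ===== LEMMAS AND PROOFS =====

-- the multiset of table hits B's scan folds over, flattened
def nlpHits (text : String) : List (String × Int × String) :=
  (PySem.List.pyRange 0 (PySem.Str.len text) 1).flatMap (fun start =>
    nlpLengths.flatMap (fun length =>
      nlpKeywords.getD (PySem.Str.slice text (some start) (some (start + length))) []))

-- a nested fold over g x is a fold over the flattened list
theorem nlp_foldl_flatMap {α β γ : Type} (l : List α) (g : α → List β) (f : γ → β → γ) (init : γ) :
    l.foldl (fun s x => (g x).foldl f s) init = (l.flatMap g).foldl f init := by
  induction l generalizing init with
  | nil => rfl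
  | cons x xs ih => simp [List.foldl_append, ih]

theorem nlp_items : nlpKeywords.items =
    [ ("anime",          [("preset", 0, "anime")]),
      ("manga",          [("preset", 0, "anime")]),
      ("cartoon",        [("preset", 0, "anime")]),
      ("chibi",          [("preset", 0, "anime")]),
      ("photo",          [("preset", 1, "realistic")]),
      ("realistic",      [("preset", 1, "realistic")]),
      ("photorealistic", [("preset", 1, "realistic")]),
      ("portrait",       [("preset", 1, "realistic"), ("aspect_ratio", 1, "9:16")]),
      ("fast",           [("preset", 2, "lcm")]),
      ("quick",          [("preset", 2, "lcm")]),
      ("draft",          [("preset", 2, "lcm")]),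
      ("landscape",      [("aspect_ratio", 0, "16:9")]),
      ("panoramic",      [("aspect_ratio", 0, "16:9")]),
      ("wide",           [("aspect_ratio", 0, "16:9")]),
      ("vertical",       [("aspect_ratio", 1, "9:16")]),
      ("tall",           [("aspect_ratio", 1, "9:16")]) ] := by decide

theorem nlpLengths_eq : nlpLengths = [4, 5, 7, 8, 9, 14] := by decide

-- everything the table can return, with the keys that return it
theorem nlp_lookup_sub (s : String) (t : String × Int × String)
    (ht : t ∈ nlpKeywords.getD s []) :
    (t = ("preset", 0, "anime") ∧ (s = "anime" ∨ s = "manga" ∨ s = "cartoon" ∨ s = "chibi")) ∨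
    (t = ("preset", 1, "realistic") ∧ (s = "photo" ∨ s = "realistic" ∨ s = "photorealistic" ∨ s = "portrait")) ∨
    (t = ("preset", 2, "lcm") ∧ (s = "fast" ∨ s = "quick" ∨ s = "draft")) ∨
    (t = ("aspect_ratio", 0, "16:9") ∧ (s = "landscape" ∨ s = "panoramic" ∨ s = "wide")) ∨
    (t = ("aspect_ratio", 1, "9:16") ∧ (s = "portrait" ∨ s = "vertical" ∨ s = "tall")) := by
  unfold PySem.Dict.getD PySem.Dict.get? at ht
  rw [nlp_items] at ht
  simp only [List.find?] at ht
  repeat' split at ht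
  all_goals try simp only [beq_iff_eq] at *
  all_goals try subst_vars
  all_goals try simp only [Option.map_some, Option.map_none, Option.getD_some, Option.getD_none,
    List.mem_cons, List.not_mem_nil] at ht
  all_goals repeat' rcases ht with rfl | ht
  all_goals first | exact ht.elim | simp

-- any hit comes from a substring of the text, hence from a keyword occurring in it
theorem nlp_occ_of_hit (text : String) (t : String × Int × String) (ht : t ∈ nlpHits text) :
    ∃ s, t ∈ nlpKeywords.getD s [] ∧ PySem.Str.isIn s text = true := by
  unfold nlpHits at ht
  rw [List.mem_flatMap] at ht
  obtain ⟨start, hstart, ht⟩ := ht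
  rw [List.mem_flatMap] at ht
  obtain ⟨length, hlen, ht⟩ := ht
  refine ⟨_, ht, ?_⟩
  rw [PySem.List.mem_pyRange_one] at hstart
  rw [nlpLengths_eq] at hlen
  simp only [List.mem_cons, List.not_mem_nil, or_false] at hlen
  have hl0 : (0 : Int) ≤ length := by rcases hlen with rfl|rfl|rfl|rfl|rfl|rfl <;> norm_num
  rw [PySem.Str.isIn_iff_infix, PySem.Str.toList_slice, PySem.Chars.slice_eq_listSlice]
  rw [PySem.List.slice_toNat text.toList hstart.1 (show (0:Int) ≤ start + length by omega)]
  exact ⟨(text.toList).take start.toNat,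
         ((text.toList).drop start.toNat).drop ((start + length).toNat - start.toNat),
         by simp [List.append_assoc, List.take_append_drop]⟩

-- a keyword of recorded length that occurs in the text produces its hits
theorem nlp_hit_of_occ (text kw : String) (t : String × Int × String)
    (hk : t ∈ nlpKeywords.getD kw []) (hlen : PySem.Str.len kw ∈ nlpLengths)
    (hne : kw.toList ≠ []) (hocc : PySem.Str.isIn kw text = true) :
    t ∈ nlpHits text := by
  rw [PySem.Str.isIn_iff_infix] at hocc
  obtain ⟨u, v, huv⟩ := hocc
  have hpre : kw.toList <+: (text.toList).drop u.length := by
    rw [← huv, List.append_assoc, List.drop_left]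
    exact ⟨v, rfl⟩
  have hklen : 0 < kw.toList.length := List.length_pos_iff.mpr hne
  have hdlen := hpre.length_le
  rw [List.length_drop] at hdlen
  have hjlt : u.length < (text.toList).length := by omega
  unfold nlpHits
  rw [List.mem_flatMap]
  refine ⟨(u.length : Int), ?_, ?_⟩
  · rw [PySem.List.mem_pyRange_one]
    refine ⟨Int.natCast_nonneg _, ?_⟩
    rw [PySem.Str.len_eq]
    exact_mod_cast hjlt
  · rw [List.mem_flatMap]
    refine ⟨PySem.Str.len kw, hlen, ?_⟩
    have hslice : PySem.Str.slice text (some (u.length : Int)) (some ((u.length : Int) + PySem.Str.len kw)) = kw := by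
      rw [← String.toList_inj, PySem.Str.toList_slice, PySem.Chars.slice_eq_listSlice, PySem.Str.len_eq, PySem.List.slice_natCast_add]
      exact ((List.prefix_iff_eq_take).mp hpre).symm
    rw [hslice]
    exact hk

theorem nlp_hits_canon (text : String) (t : String × Int × String) (ht : t ∈ nlpHits text) :
    t = ("preset", 0, "anime") ∨ t = ("preset", 1, "realistic") ∨ t = ("preset", 2, "lcm") ∨
    t = ("aspect_ratio", 0, "16:9") ∨ t = ("aspect_ratio", 1, "9:16") := by
  rcases nlp_occ_of_hit text t ht with ⟨s, hs, -⟩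
  rcases nlp_lookup_sub s t hs with ⟨h, -⟩ | ⟨h, -⟩ | ⟨h, -⟩ | ⟨h, -⟩ | ⟨h, -⟩ <;> simp [h]

-- per-triple membership in the hit list ↔ the corresponding any(...) test of A
theorem nlp_mem_pA (text : String) :
    (("preset", (0 : Int), "anime") ∈ nlpHits text) ↔
      (["anime", "manga", "cartoon", "chibi"].any (fun word => PySem.Str.isIn word text)) = true := by
  constructor
  · intro ht
    obtain ⟨s, hs, hocc⟩ := nlp_occ_of_hit _ _ ht
    rcases nlp_lookup_sub s _ hs with ⟨h1, h⟩ | ⟨h1, h⟩ | ⟨h1, h⟩ | ⟨h1, h⟩ | ⟨h1, h⟩ <;>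
      first
        | exact absurd h1 (by decide)
        | (simp only [List.any_eq_true, List.mem_cons, List.not_mem_nil, or_false]
           exact ⟨s, by tauto, hocc⟩)
  · intro hany
    simp only [List.any_eq_true, List.mem_cons, List.not_mem_nil, or_false] at hany
    obtain ⟨w, hw, hocc⟩ := hany
    rcases hw with rfl | rfl | rfl | rfl
    all_goals exact nlp_hit_of_occ _ _ _ (by decide) (by decide) (by decide) hocc

theorem nlp_mem_pR (text : String) :
    (("preset", (1 : Int), "realistic") ∈ nlpHits text) ↔
      (["photo", "realistic", "photorealistic", "portrait"].any (fun word => PySem.Str.isIn word text)) = true := by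
  constructor
  · intro ht
    obtain ⟨s, hs, hocc⟩ := nlp_occ_of_hit _ _ ht
    rcases nlp_lookup_sub s _ hs with ⟨h1, h⟩ | ⟨h1, h⟩ | ⟨h1, h⟩ | ⟨h1, h⟩ | ⟨h1, h⟩ <;>
      first
        | exact absurd h1 (by decide)
        | (simp only [List.any_eq_true, List.mem_cons, List.not_mem_nil, or_false]
           exact ⟨s, by tauto, hocc⟩)
  · intro hany
    simp only [List.any_eq_true, List.mem_cons, List.not_mem_nil, or_false] at hany
    obtain ⟨w, hw, hocc⟩ := hany
    rcases hw with rfl | rfl | rfl | rfl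
    all_goals exact nlp_hit_of_occ _ _ _ (by decide) (by decide) (by decide) hocc

theorem nlp_mem_pL (text : String) :
    (("preset", (2 : Int), "lcm") ∈ nlpHits text) ↔
      (["fast", "quick", "draft"].any (fun word => PySem.Str.isIn word text)) = true := by
  constructor
  · intro ht
    obtain ⟨s, hs, hocc⟩ := nlp_occ_of_hit _ _ ht
    rcases nlp_lookup_sub s _ hs with ⟨h1, h⟩ | ⟨h1, h⟩ | ⟨h1, h⟩ | ⟨h1, h⟩ | ⟨h1, h⟩ <;>
      first
        | exact absurd h1 (by decide)
        | (simp only [List.any_eq_true, List.mem_cons, List.not_mem_nil, or_false]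
           exact ⟨s, by tauto, hocc⟩)
  · intro hany
    simp only [List.any_eq_true, List.mem_cons, List.not_mem_nil, or_false] at hany
    obtain ⟨w, hw, hocc⟩ := hany
    rcases hw with rfl | rfl | rfl
    all_goals exact nlp_hit_of_occ _ _ _ (by decide) (by decide) (by decide) hocc

theorem nlp_mem_aW (text : String) :
    (("aspect_ratio", (0 : Int), "16:9") ∈ nlpHits text) ↔
      (["landscape", "panoramic", "wide"].any (fun word => PySem.Str.isIn word text)) = true := by
  constructor
  · intro ht
    obtain ⟨s, hs, hocc⟩ := nlp_occ_of_hit _ _ ht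
    rcases nlp_lookup_sub s _ hs with ⟨h1, h⟩ | ⟨h1, h⟩ | ⟨h1, h⟩ | ⟨h1, h⟩ | ⟨h1, h⟩ <;>
      first
        | exact absurd h1 (by decide)
        | (simp only [List.any_eq_true, List.mem_cons, List.not_mem_nil, or_false]
           exact ⟨s, by tauto, hocc⟩)
  · intro hany
    simp only [List.any_eq_true, List.mem_cons, List.not_mem_nil, or_false] at hany
    obtain ⟨w, hw, hocc⟩ := hany
    rcases hw with rfl | rfl | rfl
    all_goals exact nlp_hit_of_occ _ _ _ (by decide) (by decide) (by decide) hocc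

theorem nlp_mem_aT (text : String) :
    (("aspect_ratio", (1 : Int), "9:16") ∈ nlpHits text) ↔
      (["portrait", "vertical", "tall"].any (fun word => PySem.Str.isIn word text)) = true := by
  constructor
  · intro ht
    obtain ⟨s, hs, hocc⟩ := nlp_occ_of_hit _ _ ht
    rcases nlp_lookup_sub s _ hs with ⟨h1, h⟩ | ⟨h1, h⟩ | ⟨h1, h⟩ | ⟨h1, h⟩ | ⟨h1, h⟩ <;>
      first
        | exact absurd h1 (by decide)
        | (simp only [List.any_eq_true, List.mem_cons, List.not_mem_nil, or_false]
           exact ⟨s, by tauto, hocc⟩)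
  · intro hany
    simp only [List.any_eq_true, List.mem_cons, List.not_mem_nil, or_false] at hany
    obtain ⟨w, hw, hocc⟩ := hany
    rcases hw with rfl | rfl | rfl
    all_goals exact nlp_hit_of_occ _ _ _ (by decide) (by decide) (by decide) hocc

-- characterisation of the slot fold for the preset group (three canonical pairs)
theorem nlp_foldSlot3_aux (E : List (Int × String))
    (hE : ∀ p ∈ E, p = ((0 : Int), "anime") ∨ p = (1, "realistic") ∨ p = (2, "lcm")) :
    (E.foldl nlpUpdSlot (some ((0 : Int), "anime")) = some ((0 : Int), "anime"))
    ∧ (E.foldl nlpUpdSlot (some ((1 : Int), "realistic")) =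
        if ((0 : Int), "anime") ∈ E then some ((0 : Int), "anime") else some ((1 : Int), "realistic"))
    ∧ (E.foldl nlpUpdSlot (some ((2 : Int), "lcm")) =
        if ((0 : Int), "anime") ∈ E then some ((0 : Int), "anime")
        else if ((1 : Int), "realistic") ∈ E then some ((1 : Int), "realistic")
        else some ((2 : Int), "lcm"))
    ∧ (E.foldl nlpUpdSlot none =
        if ((0 : Int), "anime") ∈ E then some ((0 : Int), "anime")
        else if ((1 : Int), "realistic") ∈ E then some ((1 : Int), "realistic")
        else if ((2 : Int), "lcm") ∈ E then some ((2 : Int), "lcm")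
        else none) := by
  induction E with
  | nil => simp
  | cons p E ih =>
    obtain ⟨k1, k2, k3, k4⟩ := ih (fun q hq => hE q (List.mem_cons_of_mem _ hq))
    have hp := hE p (List.mem_cons_self ..)
    rcases hp with rfl | rfl | rfl <;> refine ⟨?_, ?_, ?_, ?_⟩ <;>
      simp only [List.foldl_cons, nlpUpdSlot, List.mem_cons] <;>
      norm_num [k1, k2, k3, k4]

theorem nlp_foldSlot3 (E : List (Int × String))
    (hE : ∀ p ∈ E, p = ((0 : Int), "anime") ∨ p = (1, "realistic") ∨ p = (2, "lcm")) :
    E.foldl nlpUpdSlot none =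
      (if ((0 : Int), "anime") ∈ E then some ((0 : Int), "anime")
       else if ((1 : Int), "realistic") ∈ E then some ((1 : Int), "realistic")
       else if ((2 : Int), "lcm") ∈ E then some ((2 : Int), "lcm")
       else none) :=
  (nlp_foldSlot3_aux E hE).2.2.2

-- characterisation of the slot fold for the aspect-ratio group (two canonical pairs)
theorem nlp_foldSlot2_aux (E : List (Int × String))
    (hE : ∀ p ∈ E, p = ((0 : Int), "16:9") ∨ p = (1, "9:16")) :
    (E.foldl nlpUpdSlot (some ((0 : Int), "16:9")) = some ((0 : Int), "16:9"))
    ∧ (E.foldl nlpUpdSlot (some ((1 : Int), "9:16")) =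
        if ((0 : Int), "16:9") ∈ E then some ((0 : Int), "16:9") else some ((1 : Int), "9:16"))
    ∧ (E.foldl nlpUpdSlot none =
        if ((0 : Int), "16:9") ∈ E then some ((0 : Int), "16:9")
        else if ((1 : Int), "9:16") ∈ E then some ((1 : Int), "9:16")
        else none) := by
  induction E with
  | nil => simp
  | cons p E ih =>
    obtain ⟨k1, k2, k3⟩ := ih (fun q hq => hE q (List.mem_cons_of_mem _ hq))
    have hp := hE p (List.mem_cons_self ..)
    rcases hp with rfl | rfl <;> refine ⟨?_, ?_, ?_⟩ <;>
      simp only [List.foldl_cons, nlpUpdSlot, List.mem_cons] <;>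
      norm_num [k1, k2, k3]

theorem nlp_foldSlot2 (E : List (Int × String))
    (hE : ∀ p ∈ E, p = ((0 : Int), "16:9") ∨ p = (1, "9:16")) :
    E.foldl nlpUpdSlot none =
      (if ((0 : Int), "16:9") ∈ E then some ((0 : Int), "16:9")
       else if ((1 : Int), "9:16") ∈ E then some ((1 : Int), "9:16")
       else none) :=
  (nlp_foldSlot2_aux E hE).2.2


-- elements of the projected preset/aspect hit lists are canonical pairs
theorem nlp_hEpre (text : String) :
    ∀ p ∈ ((nlpHits text).filter (fun e => e.1 == "preset")).map (fun e => e.2),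
      p = ((0 : Int), "anime") ∨ p = (1, "realistic") ∨ p = (2, "lcm") := by
  intro p hp
  simp only [List.mem_map, List.mem_filter] at hp
  obtain ⟨t, ⟨ht, hkey⟩, rfl⟩ := hp
  rcases nlp_hits_canon text t ht with rfl | rfl | rfl | rfl | rfl <;> simp_all

theorem nlp_hEasp (text : String) :
    ∀ p ∈ ((nlpHits text).filter (fun e => !(e.1 == "preset"))).map (fun e => e.2),
      p = ((0 : Int), "16:9") ∨ p = (1, "9:16") := by
  intro p hp
  simp only [List.mem_map, List.mem_filter] at hp
  obtain ⟨t, ⟨ht, hkey⟩, rfl⟩ := hp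
  rcases nlp_hits_canon text t ht with rfl | rfl | rfl | rfl | rfl <;> simp_all

-- a pair is in the projected preset hits iff the preset triple is a hit
theorem nlp_memmap_pre (text : String) (r1 : Int) (r2 : String) :
    ((r1, r2) ∈ ((nlpHits text).filter (fun e => e.1 == "preset")).map (fun e => e.2)) ↔
      ("preset", r1, r2) ∈ nlpHits text := by
  constructor
  · intro hp
    simp only [List.mem_map, List.mem_filter, beq_iff_eq] at hp
    obtain ⟨⟨k, q⟩, ⟨ht, hk⟩, h2⟩ := hp
    subst hk
    simp only at h2
    subst h2
    exact ht
  · intro ht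
    exact List.mem_map.mpr ⟨_, List.mem_filter.mpr ⟨ht, by simp⟩, rfl⟩

theorem nlp_memmap_asp_W (text : String) :
    (((0 : Int), "16:9") ∈ ((nlpHits text).filter (fun e => !(e.1 == "preset"))).map (fun e => e.2)) ↔
      ("aspect_ratio", (0 : Int), "16:9") ∈ nlpHits text := by
  constructor
  · intro hp
    simp only [List.mem_map, List.mem_filter] at hp
    obtain ⟨t, ⟨ht, -⟩, h2⟩ := hp
    rcases nlp_hits_canon text t ht with rfl | rfl | rfl | rfl | rfl <;>
      first | (exact absurd h2 (by decide)) | exact ht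
  · intro ht
    exact List.mem_map.mpr ⟨_, List.mem_filter.mpr ⟨ht, by decide⟩, rfl⟩

theorem nlp_memmap_asp_T (text : String) :
    (((1 : Int), "9:16") ∈ ((nlpHits text).filter (fun e => !(e.1 == "preset"))).map (fun e => e.2)) ↔
      ("aspect_ratio", (1 : Int), "9:16") ∈ nlpHits text := by
  constructor
  · intro hp
    simp only [List.mem_map, List.mem_filter] at hp
    obtain ⟨t, ⟨ht, -⟩, h2⟩ := hp
    rcases nlp_hits_canon text t ht with rfl | rfl | rfl | rfl | rfl <;>
      first | (exact absurd h2 (by decide)) | exact ht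
  · intro ht
    exact List.mem_map.mpr ⟨_, List.mem_filter.mpr ⟨ht, by decide⟩, rfl⟩

-- B's scan, reduced to A-shaped first-match tests
theorem nlp_alt_eq (prompt : String) :
    natural_language_to_params_alt prompt =
      (let text := PySem.Str.lower prompt
       let bp : Option (Int × String) :=
         if (["anime", "manga", "cartoon", "chibi"].any (fun word => PySem.Str.isIn word text)) then
           some (0, "anime")
         else if (["photo", "realistic", "photorealistic", "portrait"].any (fun word => PySem.Str.isIn word text)) then
           some (1, "realistic")
         else if (["fast", "quick", "draft"].any (fun word => PySem.Str.isIn word text)) then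
           some (2, "lcm")
         else none
       let ba : Option (Int × String) :=
         if (["landscape", "panoramic", "wide"].any (fun word => PySem.Str.isIn word text)) then
           some (0, "16:9")
         else if (["portrait", "vertical", "tall"].any (fun word => PySem.Str.isIn word text)) then
           some (1, "9:16")
         else none
       let params : PySem.Dict String String := PySem.Dict.empty
       let params := match bp with | some b => params.insert "preset" b.2 | none => params
       let params := match ba with | some b => params.insert "aspect_ratio" b.2 | none => params
       params.items) := by
  unfold natural_language_to_params_alt
  have hfun : (fun (best : Option (Int × String) × Option (Int × String)) (e : String × Int × String) =>
        if e.1 == "preset" then (nlpUpdSlot best.1 e.2, best.2)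
        else (best.1, nlpUpdSlot best.2 e.2)) =
      (fun s e =>
        ((fun (bp : Option (Int × String)) (e : String × Int × String) =>
            if e.1 == "preset" then nlpUpdSlot bp e.2 else bp) s.1 e,
         (fun (ba : Option (Int × String)) (e : String × Int × String) =>
            if !(e.1 == "preset") then nlpUpdSlot ba e.2 else ba) s.2 e)) := by
    funext s e
    by_cases h : e.1 == "preset" <;> simp [h]
  simp only [hfun, nlp_foldl_flatMap]
  rw [show ((PySem.List.pyRange 0 (PySem.Str.len (PySem.Str.lower prompt)) 1).flatMap (fun start =>
        nlpLengths.flatMap (fun length =>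
          nlpKeywords.getD (PySem.Str.slice (PySem.Str.lower prompt) (some start) (some (start + length))) []))) =
      nlpHits (PySem.Str.lower prompt) from rfl]
  rw [PySem.List.foldl_prod_mk
        (f := fun (a : Option (Int × String)) (e : String × Int × String) =>
          if e.1 == "preset" then nlpUpdSlot a e.2 else a)
        (g := fun (a : Option (Int × String)) (e : String × Int × String) =>
          if !(e.1 == "preset") then nlpUpdSlot a e.2 else a)]
  rw [PySem.List.foldl_if_eq_foldl_filter
        (p := fun (e : String × Int × String) => e.1 == "preset")
        (f := fun (a : Option (Int × String)) (e : String × Int × String) => nlpUpdSlot a e.2),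
      PySem.List.foldl_if_eq_foldl_filter
        (p := fun (e : String × Int × String) => !(e.1 == "preset"))
        (f := fun (a : Option (Int × String)) (e : String × Int × String) => nlpUpdSlot a e.2)]
  rw [← List.foldl_map (f := fun (e : String × Int × String) => e.2) (g := nlpUpdSlot),
      ← List.foldl_map (f := fun (e : String × Int × String) => e.2) (g := nlpUpdSlot)]
  rw [nlp_foldSlot3 _ (nlp_hEpre _), nlp_foldSlot2 _ (nlp_hEasp _)]
  simp only [nlp_memmap_pre, nlp_memmap_asp_W, nlp_memmap_asp_T]
  simp only [nlp_mem_pA, nlp_mem_pR, nlp_mem_pL, nlp_mem_aW, nlp_mem_aT]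

-- ===== VERDICT (by name: the statement is the Claim_ definition above) =====
theorem natural_language_to_params_spec : Claim_equal_natural_language_to_params := by
  intro prompt _
  unfold Spec_natural_language_to_params
  rw [nlp_alt_eq]
  simp only [natural_language_to_params]
  split_ifs <;> rfl
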